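-- pv_equiv track=rewrite | github.com/lorenzo2505-font/ITS-Esercizi | preparazione settembre-ottobre/recupero e potenziamento/es_matrice.py | caricoMin
-- ===== SOURCE A (Python) =====
-- def calcolaCarico(matrix: list[list[int]], index_r: int, index_c: int): # funzione per calcolare il calico
--
--     somma_riga = sum(matrix[index_r]) # variabile contenente il valore della somma degli elementi della riga specificata dall'indice passato in input
--     somma_colonna = 0 # somma degli elementi della colonna inizializzata a zero
--
--
--     for r in range(len(matrix)): # itero la matrice
--
--         for c in range(len(matrix[r])): # itero ogni riga della matrice
--
--             if c == index_c: # se l'indice c corrisponde a quello passato in input allora somma_colonna viene incrementato del valore matrix[r][c]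
--                 somma_colonna += matrix[r][c]
--
--     carico = somma_riga - somma_colonna # definisco la variabile carico uguale alla differenza tra la somma degli elementi di una riga e la somma degli elementi di una colonna
--
--     return carico # ritorno il valore di caricod
--
-- def caricoMin(matrix: list[list[int]]):  # funzione per calcolare il carico con il valore più basso (stesso procedimento con caricoMin ma nel condizionale si usa il segno < anzichè >)
--
--     min = False
--
--     for r in range(len(matrix)):
--
--         for c in range(len(matrix[r])):
--             t = calcolaCarico(matrix, r, c)
--
--             if t < min or min is False:
--                 min = t
--                 min_tuple: tuple = (r, c)
--
--     return min_tuple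
-- ===== SOURCE B (Python) =====
-- def caricoMin(matrix: list[list[int]]):
--     # Precompute row sums and column sums once, then a single O(n*m) scan.
--     row_sums = [sum(row) for row in matrix]
--     max_len = 0
--     for row in matrix:
--         max_len = max(max_len, len(row))
--     col_sums = [sum(row[c] for row in matrix if len(row) > c) for c in range(max_len)]
--     best = None
--     for r in range(len(matrix)):
--         for c in range(len(matrix[r])):
--             load = row_sums[r] - col_sums[c]
--             if best is None or load < best:
--                 best = load
--                 best_cell = (r, c)
--     return best_cell
-- ===== Notes on version B (the rewrite author's own statement) =====
-- stated objective: faster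
-- what changed: A recomputes the full column sum with a nested scan of the whole matrix for every cell; B precomputes all row sums and column sums once and then does a single pass taking load = row_sums[r] - col_sums[c]; Pre_ excludes only matrices with no nonempty row, on which both A and B raise UnboundLocalError.
import Mathlib
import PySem

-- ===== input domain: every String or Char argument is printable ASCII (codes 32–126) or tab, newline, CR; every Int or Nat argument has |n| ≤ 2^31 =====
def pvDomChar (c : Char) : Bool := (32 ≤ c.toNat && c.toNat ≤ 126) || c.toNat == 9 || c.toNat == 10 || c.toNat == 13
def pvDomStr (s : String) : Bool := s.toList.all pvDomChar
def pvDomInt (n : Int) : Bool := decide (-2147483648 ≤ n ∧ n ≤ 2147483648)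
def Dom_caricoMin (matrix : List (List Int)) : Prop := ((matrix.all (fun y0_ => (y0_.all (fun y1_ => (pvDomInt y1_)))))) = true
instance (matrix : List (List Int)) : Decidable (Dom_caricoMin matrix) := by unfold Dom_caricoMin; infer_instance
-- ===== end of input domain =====

-- B precomputes row sums and column sums once (one O(n*m) pass) where A rescans the whole matrix per cell.

-- ===== PORT A =====
-- helper calcolaCarico: row sum minus column sum, the column sum recomputed by a full nested scan
def calcolaCarico (matrix : List (List Int)) (index_r index_c : Nat) : Int :=
  let somma_riga : Int := (matrix.getD index_r []).sum
  let somma_colonna : Int :=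
    (List.range matrix.length).foldl (fun acc r =>
      (List.range (matrix.getD r []).length).foldl (fun acc2 c =>
        if c = index_c then acc2 + (matrix.getD r []).getD c 0 else acc2) acc) 0
  somma_riga - somma_colonna

-- state: none = (min is False, min_tuple unset); `t < min or min is False` always fires on the first cell
def caricoMin (matrix : List (List Int)) : List Int :=
  let res : Option (Int × Nat × Nat) :=
    (List.range matrix.length).foldl (fun st r =>
      (List.range (matrix.getD r []).length).foldl (fun st c =>
        let t := calcolaCarico matrix r c
        match st with
        | none => some (t, r, c)
        | some (m, p) => if t < m then some (t, r, c) else some (m, p)) st) none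
  match res with
  | some (_, r, c) => [(r : Int), (c : Int)]
  | none => []  -- Python raises UnboundLocalError here; excluded by Pre_

-- ===== PORT B =====
def caricoMin_alt (matrix : List (List Int)) : List Int :=
  let rowSums : List Int := matrix.map List.sum
  let maxLen : Nat := matrix.foldl (fun acc row => max acc row.length) 0
  let colSums : List Int := (List.range maxLen).map (fun c =>
    matrix.foldl (fun s row => if c < row.length then s + row.getD c 0 else s) 0)
  let res : Option (Int × Nat × Nat) :=
    (List.range matrix.length).foldl (fun st r =>
      (List.range (matrix.getD r []).length).foldl (fun st c =>
        let load := rowSums.getD r 0 - colSums.getD c 0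
        match st with
        | none => some (load, r, c)
        | some (m, p) => if load < m then some (load, r, c) else some (m, p)) st) none
  match res with
  | some (_, r, c) => [(r : Int), (c : Int)]
  | none => []  -- Python raises UnboundLocalError here; excluded by Pre_

-- ===== PRECONDITION & SPEC =====
-- Pre_ excludes only matrices with no nonempty row: there A (and B) raise UnboundLocalError.
def Pre_caricoMin (matrix : List (List Int)) : Prop := ∃ row ∈ matrix, row ≠ []
instance (matrix : List (List Int)) : Decidable (Pre_caricoMin matrix) := by unfold Pre_caricoMin; infer_instance
def pvWitness_caricoMin : List (List Int) := [[1, 2], [3]]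

def Spec_caricoMin (matrix : List (List Int)) (out : List Int) : Prop := out = caricoMin_alt matrix
instance (matrix : List (List Int)) (out : List Int) : Decidable (Spec_caricoMin matrix out) := by unfold Spec_caricoMin; infer_instance

-- ===== CLAIM (what is proved, stated in full; the proofs are below) =====
def Claim_equal_caricoMin : Prop := ∀ (matrix : List (List Int)), Dom_caricoMin matrix → Pre_caricoMin matrix → Spec_caricoMin matrix (caricoMin matrix)

-- ===== LEMMAS AND PROOFS =====

-- A's innermost loop over a row adds exactly the entry at column ic, if the row has one
lemma rowpick_sum (row : List Int) (ic : Nat) :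
    ∀ (n : Nat) (acc : Int),
      (List.range n).foldl (fun a c => if c = ic then a + row.getD c 0 else a) acc
        = acc + (if ic < n then row.getD ic 0 else 0) := by
  intro n
  induction n with
  | zero => intro acc; simp
  | succ n ih =>
    intro acc
    rw [List.range_succ, List.foldl_append, ih]
    simp only [List.foldl_cons, List.foldl_nil]
    by_cases h : n = ic
    · subst h
      simp
    · have : ic < n + 1 ↔ ic < n := by omega
      simp [h, this]

-- A's double column-scan equals B's single fold over the rows
lemma colA (ic : Nat) :
    ∀ (rows : List (List Int)) (acc : Int),
      (List.range rows.length).foldl (fun a r =>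
        (List.range ((rows.getD r []).length)).foldl (fun a2 c =>
          if c = ic then a2 + (rows.getD r []).getD c 0 else a2) a) acc
      = rows.foldl (fun s row => if ic < row.length then s + row.getD ic 0 else s) acc := by
  intro rows
  induction rows with
  | nil => intro acc; simp
  | cons x rows ih =>
    intro acc
    rw [List.length_cons, List.range_succ_eq_map, List.foldl_cons, List.foldl_map]
    simp only [List.getD_cons_zero, List.getD_cons_succ]
    rw [rowpick_sum, ih]
    simp only [List.foldl_cons]
    by_cases h : ic < x.length
    · simp [h]
    · simp [h]

lemma getD_map_sum (matrix : List (List Int)) (r : Nat) (hr : r < matrix.length) :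
    (matrix.map List.sum).getD r 0 = (matrix.getD r []).sum := by
  simp [List.getD_eq_getElem?_getD, List.getElem?_map, List.getElem?_eq_getElem hr]

lemma getD_map_range' {α : Type} (f : Nat → α) (n c : Nat) (d : α) (hc : c < n) :
    ((List.range n).map f).getD c d = f c := by
  simp [List.getD_eq_getElem?_getD, List.getElem?_map, List.getElem?_range hc]

-- per-cell equality: A's recomputed carico = B's precomputed row sum minus column sum
lemma cell_eq (matrix : List (List Int)) (r c : Nat)
    (hr : r < matrix.length) (hc : c < (matrix.getD r []).length) :
    calcolaCarico matrix r c
      = (matrix.map List.sum).getD r 0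
        - ((List.range (matrix.foldl (fun acc row => max acc row.length) 0)).map (fun c =>
            matrix.foldl (fun s row => if c < row.length then s + row.getD c 0 else s) 0)).getD c 0 := by
  have hmem : matrix.getD r [] ∈ matrix := by
    rw [List.getD_eq_getElem?_getD, List.getElem?_eq_getElem hr]
    exact List.getElem_mem hr
  have hmax : (matrix.getD r []).length ≤ matrix.foldl (fun acc row => max acc row.length) 0 :=
    (PySem.List.le_foldl_max_nat matrix List.length 0).2 _ hmem
  have hcmax : c < matrix.foldl (fun acc row => max acc row.length) 0 := lt_of_lt_of_le hc hmax
  rw [getD_map_range' _ _ _ _ hcmax, getD_map_sum matrix r hr]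
  unfold calcolaCarico
  rw [colA]

-- ===== VERDICT (by name: the statement is the Claim_ definition above) =====
theorem caricoMin_spec : Claim_equal_caricoMin := by
  intro matrix _ _
  unfold Spec_caricoMin caricoMin caricoMin_alt
  have hfold :
      (List.range matrix.length).foldl (fun st r =>
        (List.range (matrix.getD r []).length).foldl (fun st c =>
          let t := calcolaCarico matrix r c
          match st with
          | none => some (t, r, c)
          | some (m, p) => if t < m then some (t, r, c) else some (m, p)) st)
        (none : Option (Int × Nat × Nat))
      = (List.range matrix.length).foldl (fun st r =>
        (List.range (matrix.getD r []).length).foldl (fun st c =>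
          let load := (matrix.map List.sum).getD r 0
            - ((List.range (matrix.foldl (fun acc row => max acc row.length) 0)).map (fun c =>
                matrix.foldl (fun s row => if c < row.length then s + row.getD c 0 else s) 0)).getD c 0
          match st with
          | none => some (load, r, c)
          | some (m, p) => if load < m then some (load, r, c) else some (m, p)) st)
        (none : Option (Int × Nat × Nat)) := by
    apply PySem.List.foldl_congr_mem
    intro st r hrmem
    have hr : r < matrix.length := by
      simpa using List.mem_range.mp hrmem
    apply PySem.List.foldl_congr_mem
    intro st2 c hcmem
    have hc : c < (matrix.getD r []).length := List.mem_range.mp hcmem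
    simp only [cell_eq matrix r c hr hc]
  simp only [hfold]
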